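-- pv_equiv track=rewrite | github.com/jiabinfan/cmput496_search_Kowledge_simulation | assignment1/final_solution_shanzhi_part.py | diagonal_right_board
-- ===== SOURCE A (Python) =====
-- def diagonal_right_board(board):
--
--     row = len(board)
--     col = len(board[0])
--     col2 = col
--     result = []#this will make a diagonl right solution list
--
--     for i in range(row):
--         for j in range(col2 - 1, -1, -1): #backward j
--             sub_re = []
--             i1, j1 = i, j
--             while i1 <= row - 1 and j1 <= col - 1:
--                 sub_re.append(board[i1][j1])
--                 j1 += 1
--                 i1 += 1
--             result.append(sub_re)
--             if i == 0 and j == 0:#when achieve the (0,0)let j = 0stable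
--                 col2 = 1
--     return result
-- ===== SOURCE B (Python) =====
-- def diagonal_right_board(board):
--     # One-pass group-by: bucket each cell by its diagonal id i-j, then emit
--     # the buckets in ascending key order (equals A's emission order).
--     col = len(board[0])
--     diags = {}
--     for i in range(len(board)):
--         for j in range(col):
--             diags.setdefault(i - j, []).append(board[i][j])
--     return [diags[d] for d in sorted(diags)]
-- ===== Notes on version B (the rewrite author's own statement) =====
-- stated objective: alternative
-- what changed: Replaces the per-diagonal while-walks (driven by a mutating col2 loop bound) with a single row-major pass that buckets each cell into a dict keyed by diagonal id i-j, then emits the buckets in sorted key order, which equals A's emission order.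
import Mathlib
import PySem

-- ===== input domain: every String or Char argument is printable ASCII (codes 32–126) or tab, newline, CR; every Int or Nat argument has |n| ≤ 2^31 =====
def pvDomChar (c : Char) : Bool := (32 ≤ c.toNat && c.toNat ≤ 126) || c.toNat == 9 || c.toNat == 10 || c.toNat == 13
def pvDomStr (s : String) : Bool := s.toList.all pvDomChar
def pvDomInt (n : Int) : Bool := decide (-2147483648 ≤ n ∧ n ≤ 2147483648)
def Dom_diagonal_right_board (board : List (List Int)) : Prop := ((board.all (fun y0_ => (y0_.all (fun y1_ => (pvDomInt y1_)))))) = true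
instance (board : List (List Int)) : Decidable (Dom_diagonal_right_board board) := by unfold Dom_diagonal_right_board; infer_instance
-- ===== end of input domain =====

-- B replaces A's per-diagonal while-walks (with a mutating inner loop bound) by one
-- row-major pass grouping cells into a dict keyed by the diagonal id i-j, emitted in
-- sorted key order; objective: alternative decomposition, same asymptotic cost.

-- ===== PORT A =====
-- the inner `while i1 <= row-1 and j1 <= col-1` walk of A (board[i1][j1] via pyGetD;
-- exact on Pre_, where every visited index is in range)
def pvWalkA (board : List (List Int)) (row col : Int) (i1 j1 : Int) : List Int :=
  if h : i1 ≤ row - 1 ∧ j1 ≤ col - 1 then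
    PySem.List.pyGetD (PySem.List.pyGetD board i1 []) j1 0 ::
      pvWalkA board row col (i1 + 1) (j1 + 1)
  else []
termination_by (row - i1).toNat
decreasing_by omega

def diagonal_right_board (board : List (List Int)) : List (List Int) :=
  let row : Int := PySem.List.len board
  let col : Int := PySem.List.len (PySem.List.pyGetD board 0 [])
  ((PySem.List.pyRange 0 row 1).foldl
    (fun (st : Int × List (List Int)) i =>
      (PySem.List.pyRange (st.1 - 1) (-1) (-1)).foldl
        (fun (st2 : Int × List (List Int)) j =>
          let sub_re := pvWalkA board row col i j
          if i = 0 ∧ j = 0 then ((1 : Int), st2.2 ++ [sub_re])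
          else (st2.1, st2.2 ++ [sub_re])) st)
    (col, ([] : List (List Int)))).2

-- ===== PORT B =====
-- `diags.setdefault(i-j, []).append(v)` is exactly `Dict.modify (i-j) [] (· ++ [v])`
def diagonal_right_board_alt (board : List (List Int)) : List (List Int) :=
  let col : Int := PySem.List.len (PySem.List.pyGetD board 0 [])
  let diags : PySem.Dict Int (List Int) :=
    (PySem.List.pyRange 0 (PySem.List.len board) 1).foldl
      (fun d i =>
        (PySem.List.pyRange 0 col 1).foldl
          (fun d j =>
            d.modify (i - j) []
              (fun cur => cur ++ [PySem.List.pyGetD (PySem.List.pyGetD board i []) j 0])) d)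
      PySem.Dict.empty
  (PySem.List.sorted diags.keys (fun k => k) false).map (fun k => diags.getD k [])

-- ===== PRECONDITION & SPEC =====
-- Pre_ excludes exactly the inputs where A raises IndexError: the empty board
-- (board[0] raises) and boards with a row shorter than len(board[0]) (some
-- board[i1][j1] access on a diagonal walk is out of range); B raises on exactly
-- the same inputs, so Pre_ admits every input on which A returns.
def Pre_diagonal_right_board (board : List (List Int)) : Prop :=
  board ≠ [] ∧ ∀ r ∈ board, (PySem.List.pyGetD board 0 []).length ≤ r.length
instance (board : List (List Int)) : Decidable (Pre_diagonal_right_board board) := by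
  unfold Pre_diagonal_right_board; infer_instance
def pvWitness_diagonal_right_board : List (List Int) := [[1, 2], [3, 4]]
def Spec_diagonal_right_board (board : List (List Int)) (out : List (List Int)) : Prop :=
  out = diagonal_right_board_alt board
instance (board : List (List Int)) (out : List (List Int)) : Decidable (Spec_diagonal_right_board board out) := by
  unfold Spec_diagonal_right_board; infer_instance

-- ===== CLAIM (what is proved, stated in full; the proofs are below) =====
def Claim_equal_diagonal_right_board : Prop := ∀ (board : List (List Int)), Dom_diagonal_right_board board → Pre_diagonal_right_board board → Spec_diagonal_right_board board (diagonal_right_board board)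

-- ===== LEMMAS AND PROOFS =====

-- cell board[i][j] (Int indices), the value both ports read
def pvCell (board : List (List Int)) (i j : Int) : Int :=
  PySem.List.pyGetD (PySem.List.pyGetD board i []) j 0

-- the (key, value) pairs produced by row i of B's pass
def pvRow (board : List (List Int)) (colN i : Nat) : List (Int × Int) :=
  (List.range colN).map (fun (j : Nat) => ((i : Int) - (j : Int), pvCell board i j))

-- all pairs of the first n rows, in B's scan order
def pvL (board : List (List Int)) (colN n : Nat) : List (Int × Int) :=
  (List.range n).flatMap (pvRow board colN)

-- B's dict-building step
def pvStep (d : PySem.Dict Int (List Int)) (p : Int × Int) : PySem.Dict Int (List Int) :=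
  d.modify p.1 [] (fun cur => cur ++ [p.2])

-- ascending list of diagonal keys
def pvAsc (colN n : Nat) : List Int :=
  (List.range (colN - 1 + n)).map (fun (t : Nat) => (t : Int) - ((colN : Int) - 1))

theorem pvL_succ (board : List (List Int)) (colN n : Nat) :
    pvL board colN (n + 1) = pvL board colN n ++ pvRow board colN n := by
  simp [pvL, List.range_succ, List.flatMap_append]

theorem pv_rowFilter (board : List (List Int)) (colN i : Nat) (k : Int) :
    ((pvRow board colN i).filter (fun p => p.1 == k)).map (·.2) =
      if (i : Int) - (colN : Int) < k ∧ k ≤ (i : Int)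
      then [pvCell board i ((i : Int) - k)] else [] := by
  induction colN with
  | zero => simp [pvRow]
  | succ c ih =>
    rw [pvRow, List.range_succ, List.map_append, List.filter_append, List.map_append]
    have hr : ((List.range c).map (fun (j : Nat) => ((i : Int) - (j : Int), pvCell board i j))) = pvRow board c i := rfl
    rw [hr, ih]
    by_cases hk : (i : Int) - (c : Int) = k
    · rw [if_neg (by omega : ¬((i : Int) - (c : Int) < k ∧ k ≤ (i : Int)))]
      have hf : List.filter (fun p => p.1 == k) [((i : Int) - (c : Int), pvCell board i c)]
          = [((i : Int) - (c : Int), pvCell board i c)] := by simp [hk]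
      rw [List.map_cons, List.map_nil, hf, if_pos (by omega : (i : Int) - ((c : Nat) + 1 : Nat) < k ∧ k ≤ (i : Int))]
      have hc2 : (↑i - k : Int) = (c : Int) := by omega
      simp [hc2]
    · have hf : List.filter (fun p => p.1 == k) [((i : Int) - (c : Int), pvCell board i c)]
          = [] := by simp [hk]
      rw [List.map_cons, List.map_nil, hf]
      simp only [List.map_nil, List.append_nil]
      have heq : (((i : Int) - ((c : Nat) + 1 : Nat) < k ∧ k ≤ (i : Int)) ↔ ((i : Int) - (c : Int) < k ∧ k ≤ (i : Int))) := by omega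
      rw [if_congr heq rfl rfl]

theorem pv_mem_asc (colN n : Nat) (hc : 1 ≤ colN) (k : Int) :
    (k ∈ pvAsc colN n) ↔ (1 - (colN : Int) ≤ k ∧ k ≤ (n : Int) - 1) := by
  simp only [pvAsc, List.mem_map, List.mem_range]
  constructor
  · rintro ⟨t, ht, rfl⟩; omega
  · intro h
    refine ⟨(k + ((colN : Int) - 1)).toNat, by omega, by omega⟩

theorem pv_asc_pairwise (colN n : Nat) :
    (pvAsc colN n).Pairwise (· < ·) := by
  refine List.Pairwise.map _ ?_ List.pairwise_lt_range
  intro a b hab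
  omega
theorem pv_walkA_nil (board : List (List Int)) (r c : Int) (i j : Int)
    (h : ¬ (i ≤ r - 1 ∧ j ≤ c - 1)) : pvWalkA board r c i j = [] := by
  rw [pvWalkA, dif_neg h]

theorem pv_walkA_cons (board : List (List Int)) (r c : Int) (i j : Int)
    (h : i ≤ r - 1 ∧ j ≤ c - 1) :
    pvWalkA board r c i j = pvCell board i j :: pvWalkA board r c (i + 1) (j + 1) := by
  rw [pvWalkA, dif_pos h]; rfl

theorem pv_walk_succ (board : List (List Int)) (c : Int) (n : Nat) :
    ∀ (m : Nat) (i j : Int), 0 ≤ i → 0 ≤ j → ((n : Int) + 1 - i).toNat ≤ m →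
      pvWalkA board ((n : Int) + 1) c i j =
        pvWalkA board (n : Int) c i j ++
          (if i ≤ (n : Int) ∧ j + ((n : Int) - i) ≤ c - 1
           then [pvCell board (n : Int) (j + ((n : Int) - i))] else []) := by
  intro m
  induction m with
  | zero =>
    intro i j hi hj hm
    rw [pv_walkA_nil board _ c i j (by omega), pv_walkA_nil board _ c i j (by omega),
      if_neg (by omega)]
    rfl
  | succ m ih =>
    intro i j hi hj hm
    by_cases hj1 : j ≤ c - 1
    · by_cases hi1 : i ≤ (n : Int) - 1
      · -- i < n : both walks take a step
        rw [pv_walkA_cons board _ c i j ⟨by omega, hj1⟩,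
          pv_walkA_cons board _ c i j ⟨hi1, hj1⟩,
          ih (i + 1) (j + 1) (by omega) (by omega) (by omega), List.cons_append]
        congr 2
        rw [show (j + 1 + ((n : Int) - (i + 1))) = j + ((n : Int) - i) by omega]
        exact if_congr (by omega) rfl rfl
      · by_cases hi2 : i ≤ (n : Int)
        · -- i = n : left walk takes exactly one step
          rw [pv_walkA_cons board _ c i j ⟨by omega, hj1⟩,
            pv_walkA_nil board _ c (i + 1) (j + 1) (by omega),
            pv_walkA_nil board _ c i j (by omega),
            if_pos ⟨hi2, by omega⟩, List.nil_append,
            show (j + ((n : Int) - i)) = j by omega,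
            show i = (n : Int) by omega]
        · -- i > n : everything empty
          rw [pv_walkA_nil board _ c i j (by omega),
            pv_walkA_nil board _ c i j (by omega), if_neg (by omega)]
          rfl
    · -- j out of range: everything empty
      rw [pv_walkA_nil board _ c i j (by omega),
        pv_walkA_nil board _ c i j (by omega), if_neg (by omega)]
      rfl

theorem pv_F_eq_walk (board : List (List Int)) (colN : Nat) :
    ∀ (n : Nat) (k : Int),
      ((pvL board colN n).filter (fun p => p.1 == k)).map (·.2) =
        pvWalkA board (n : Int) (colN : Int) (max k 0) (max (-k) 0) := by
  intro n
  induction n with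
  | zero =>
    intro k
    rw [pv_walkA_nil board _ _ _ _ (by omega : ¬ (max k 0 ≤ ((0 : Nat) : Int) - 1 ∧ max (-k) 0 ≤ (colN : Int) - 1))]
    simp [pvL]
  | succ n ih =>
    intro k
    rw [pvL_succ, List.filter_append, List.map_append, ih, pv_rowFilter]
    rw [show (((n : Nat) + 1 : Nat) : Int) = (n : Int) + 1 by push_cast; rfl]
    rw [pv_walk_succ board (colN : Int) n (((n : Int) + 1 - max k 0).toNat) (max k 0) (max (-k) 0) (by omega) (by omega) (le_refl _)]
    congr 1
    by_cases hc : ((n : Int) - (colN : Int) < k ∧ k ≤ (n : Int))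
    · rw [if_pos hc, if_pos (by omega : max k 0 ≤ (n : Int) ∧ max (-k) 0 + ((n : Int) - max k 0) ≤ (colN : Int) - 1)]
      rw [show (max (-k) 0 + ((n : Int) - max k 0)) = (n : Int) - k by omega]
    · rw [if_neg hc, if_neg (by omega : ¬ (max k 0 ≤ (n : Int) ∧ max (-k) 0 + ((n : Int) - max k 0) ≤ (colN : Int) - 1))]
theorem pv_update_nil_eq_ofList {α : Type} [BEq α] (xs : List α) :
    PySem.Set.update ([] : PySem.Set α) xs = PySem.Set.ofList xs := by
  rw [PySem.Set.ofList_eq_foldl]; rfl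

theorem pv_alt_eq (board : List (List Int)) :
    diagonal_right_board_alt board =
      (PySem.List.sorted
          ((pvL board (PySem.List.pyGetD board 0 []).length board.length).foldl pvStep PySem.Dict.empty).keys
          (fun k => k) false).map
        (fun k => ((pvL board (PySem.List.pyGetD board 0 []).length board.length).foldl pvStep PySem.Dict.empty).getD k []) := by
  unfold diagonal_right_board_alt
  simp only [PySem.List.len_eq, PySem.List.pyRange_zero_natCast, List.foldl_map]
  rw [show ((pvL board (PySem.List.pyGetD board 0 []).length board.length).foldl pvStep PySem.Dict.empty)
      = (List.range board.length).foldl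
          (fun d (i : Nat) => (List.range (PySem.List.pyGetD board 0 []).length).foldl
            (fun d (j : Nat) => pvStep d (((i : Int) - (j : Int)), pvCell board i j)) d)
          PySem.Dict.empty from by
    rw [pvL, List.foldl_flatMap]
    exact PySem.List.foldl_congr_mem _ _ _ _ (by intro d i _; rw [pvRow, List.foldl_map])]
  rfl
theorem pv_keys_eq (board : List (List Int)) (colN n : Nat) :
    ((pvL board colN n).foldl pvStep PySem.Dict.empty).keys
      = PySem.Set.ofList ((pvL board colN n).map (·.1)) := by
  have h := PySem.Dict.keys_foldl_modify_key (pvL board colN n) (fun p : Int × Int => p.1)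
    ([] : List Int) (fun _ p => fun cur => cur ++ [p.2]) PySem.Dict.empty
  simpa [pvStep, pv_update_nil_eq_ofList, PySem.Dict.keys_empty] using h

theorem pv_mem_keys (board : List (List Int)) (colN n : Nat) (hc : 1 ≤ colN) (hn : 1 ≤ n) (k : Int) :
    (k ∈ (pvL board colN n).map (·.1)) ↔ (1 - (colN : Int) ≤ k ∧ k ≤ (n : Int) - 1) := by
  simp only [pvL, pvRow, List.map_flatMap, List.mem_flatMap, List.mem_range, List.map_map,
    List.mem_map, Function.comp]
  constructor
  · rintro ⟨i, hi, j, hj, rfl⟩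
    constructor <;> omega
  · intro h
    refine ⟨(max k 0).toNat, by omega, (max (-k) 0).toNat, by omega, by omega⟩

theorem pv_sorted_keys (board : List (List Int)) (colN n : Nat) (hc : 1 ≤ colN) (hn : 1 ≤ n) :
    PySem.List.sorted (PySem.Set.ofList ((pvL board colN n).map (·.1))) (fun k => k) false
      = pvAsc colN n := by
  apply PySem.List.sorted_eq_of_perm_of_pairwise_lt
  · rw [List.perm_ext_iff_of_nodup (pv_asc_pairwise colN n).nodup (PySem.Set.nodup_ofList _)]
    intro a
    rw [pv_mem_asc colN n hc a, PySem.Set.mem_ofList, pv_mem_keys board colN n hc hn a]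
  · exact pv_asc_pairwise colN n
theorem pv_getD_eq (board : List (List Int)) (colN n : Nat) (k : Int) :
    ((pvL board colN n).foldl pvStep PySem.Dict.empty).getD k []
      = ((pvL board colN n).filter (fun p => p.1 == k)).map (·.2) := by
  have h := PySem.Dict.getD_foldl_modify_append (pvL board colN n) PySem.Dict.empty k
  simpa [pvStep, PySem.Dict.getD_empty] using h

theorem pv_B_eq (board : List (List Int)) (colN n : Nat) (hc : 1 ≤ colN) (hn : 1 ≤ n)
    (hcol : colN = (PySem.List.pyGetD board 0 []).length) (hrow : n = board.length) :
    diagonal_right_board_alt board =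
      (pvAsc colN n).map (fun k => pvWalkA board (n : Int) (colN : Int) (max k 0) (max (-k) 0)) := by
  subst hcol hrow
  rw [pv_alt_eq, pv_keys_eq, pv_sorted_keys _ _ _ hc hn]
  apply List.map_congr_left
  intro k hk
  rw [pv_getD_eq, pv_F_eq_walk]

-- A's inner loop body and inner loop (definitionally the port's, with sub_re inlined)
def pvBody (board : List (List Int)) (R C i : Int) (st2 : Int × List (List Int)) (j : Int) :
    Int × List (List Int) :=
  if i = 0 ∧ j = 0 then ((1 : Int), st2.2 ++ [pvWalkA board R C i j])
  else (st2.1, st2.2 ++ [pvWalkA board R C i j])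

def pvInner (board : List (List Int)) (R C i : Int) (st : Int × List (List Int)) :
    Int × List (List Int) :=
  (PySem.List.pyRange (st.1 - 1) (-1) (-1)).foldl (pvBody board R C i) st

theorem pv_A_unfold (board : List (List Int)) :
    diagonal_right_board board =
      ((PySem.List.pyRange 0 (PySem.List.len board) 1).foldl
        (fun st i => pvInner board (PySem.List.len board) (PySem.List.len (PySem.List.pyGetD board 0 [])) i st)
        (PySem.List.len (PySem.List.pyGetD board 0 []), ([] : List (List Int)))).2 := rfl

theorem pv_noflag_fold (board : List (List Int)) (R C i : Int) :
    ∀ (js : List Int) (st : Int × List (List Int)), (∀ j ∈ js, ¬ (i = 0 ∧ j = 0)) →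
      js.foldl (pvBody board R C i) st
        = (st.1, st.2 ++ js.map (fun j => pvWalkA board R C i j)) := by
  intro js
  induction js with
  | nil => intro st _; simp
  | cons j js ih =>
    intro st h
    rw [List.foldl_cons, show pvBody board R C i st j = (st.1, st.2 ++ [pvWalkA board R C i j]) from by
        rw [pvBody, if_neg (h j (by simp))],
      ih _ (fun j' hj' => h j' (by simp [hj']))]
    simp

theorem pv_inner_first (board : List (List Int)) (R C : Int) (colN : Nat) (hc : 1 ≤ colN)
    (hC : C = (colN : Int)) :
    pvInner board R C 0 (C, ([] : List (List Int)))
      = (1, (List.range colN).map (fun (t : Nat) => pvWalkA board R C 0 (C - 1 - (t : Int)))) := by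
  rw [pvInner]
  rw [show ((C, ([] : List (List Int))).1) = C from rfl]
  rw [PySem.List.pyRange_neg_one]
  rw [show ((C - 1 - -1).toNat) = colN from by omega]
  rw [show List.range colN = List.range (colN - 1) ++ [colN - 1] from by
    rw [← List.range_succ]; congr 1; omega]
  rw [List.map_append, List.foldl_append]
  rw [pv_noflag_fold board R C 0 ((List.range (colN - 1)).map (fun (k : Nat) => C - 1 - (k : Int))) (C, []) (by
    intro j hj hj0
    simp only [List.mem_map, List.mem_range] at hj
    obtain ⟨t, ht, rfl⟩ := hj
    omega)]
  simp only [List.map_cons, List.map_nil, List.foldl_cons, List.foldl_nil, List.nil_append]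
  rw [pvBody, if_pos ⟨rfl, by omega⟩]
  simp [Function.comp_def]
theorem pv_tail_fold (board : List (List Int)) (R C : Int) :
    ∀ (is : List Int), (∀ i ∈ is, i ≠ 0) → ∀ (acc : List (List Int)),
      is.foldl (fun st i => pvInner board R C i st) (1, acc)
        = (1, acc ++ is.map (fun i => pvWalkA board R C i 0)) := by
  intro is
  induction is with
  | nil => intro _ acc; simp
  | cons i is ih =>
    intro h acc
    rw [List.foldl_cons]
    have hstep : pvInner board R C i ((1 : Int), acc) = (1, acc ++ [pvWalkA board R C i 0]) := by
      rw [pvInner, show (((1 : Int), acc).1 - 1) = 0 from by norm_num,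
        show PySem.List.pyRange 0 (-1) (-1) = [0] from by decide,
        List.foldl_cons, List.foldl_nil, pvBody,
        if_neg (by simp [h i (by simp)])]
    rw [hstep, ih (fun i' hi' => h i' (List.mem_cons_of_mem _ hi'))]
    simp

theorem pv_fold_zero_col (board : List (List Int)) (R : Int) :
    ∀ (is : List Int) (st : Int × List (List Int)), st.1 = 0 →
      is.foldl (fun st i => pvInner board R 0 i st) st = st := by
  intro is
  induction is with
  | nil => intro st _; rfl
  | cons i is ih =>
    intro st h
    rw [List.foldl_cons, show pvInner board R 0 i st = st from by
      rw [pvInner, h, show ((0 : Int) - 1) = -1 from by norm_num,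
        PySem.List.pyRange_neg_one_eq_nil (by norm_num), List.foldl_nil],
      ih st h]

theorem pv_zero_col_A (board : List (List Int)) (h : (PySem.List.pyGetD board 0 []).length = 0) :
    diagonal_right_board board = [] := by
  rw [pv_A_unfold]
  rw [show PySem.List.len (PySem.List.pyGetD board 0 []) = (0 : Int) from by
    simp [PySem.List.len_eq, h]]
  rw [pv_fold_zero_col board _ _ _ rfl]

theorem pv_zero_col_B (board : List (List Int)) (h : (PySem.List.pyGetD board 0 []).length = 0) :
    diagonal_right_board_alt board = [] := by
  rw [pv_alt_eq, h]
  rw [show pvL board 0 board.length = [] from List.flatMap_eq_nil_iff.mpr (fun i _ => by simp [pvRow])]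
  simp [PySem.Dict.keys_empty]
theorem pv_A_eq (board : List (List Int)) (colN n : Nat) (hc : 1 ≤ colN) (hn : 1 ≤ n)
    (hcol : colN = (PySem.List.pyGetD board 0 []).length) (hrow : n = board.length) :
    diagonal_right_board board =
      ((List.range colN).map (fun (t : Nat) => pvWalkA board (n : Int) (colN : Int) 0 ((colN : Int) - 1 - (t : Int))))
        ++ (List.range (n - 1)).map (fun (t : Nat) => pvWalkA board (n : Int) (colN : Int) ((t : Int) + 1) 0) := by
  obtain ⟨m, rfl⟩ : ∃ m, n = m + 1 := ⟨n - 1, by omega⟩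
  rw [pv_A_unfold]
  rw [show PySem.List.len board = ((m + 1 : Nat) : Int) from by simp [PySem.List.len_eq, ← hrow],
    show PySem.List.len (PySem.List.pyGetD board 0 []) = ((colN : Nat) : Int) from by
      simp [PySem.List.len_eq, ← hcol]]
  rw [PySem.List.pyRange_zero_natCast, List.range_succ_eq_map, List.map_cons, List.foldl_cons,
    Nat.cast_zero, pv_inner_first board _ _ colN hc rfl, List.map_map]
  rw [pv_tail_fold board _ _ _ (by
    intro i hi
    simp only [List.mem_map, Function.comp] at hi
    obtain ⟨t, _, rfl⟩ := hi
    omega)]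
  rw [List.map_map]
  simp only [Nat.add_sub_cancel]
  congr 1

theorem pv_asc_split (board : List (List Int)) (colN n : Nat) (hc : 1 ≤ colN) (hn : 1 ≤ n) :
    (pvAsc colN n).map (fun k => pvWalkA board (n : Int) (colN : Int) (max k 0) (max (-k) 0)) =
      ((List.range colN).map (fun (t : Nat) => pvWalkA board (n : Int) (colN : Int) 0 ((colN : Int) - 1 - (t : Int))))
        ++ (List.range (n - 1)).map (fun (t : Nat) => pvWalkA board (n : Int) (colN : Int) ((t : Int) + 1) 0) := by
  rw [pvAsc, show colN - 1 + n = colN + (n - 1) from by omega, List.range_add,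
    List.map_append, List.map_append, List.map_map, List.map_map]
  congr 1
  · apply List.map_congr_left
    intro t ht
    simp only [List.mem_range] at ht
    rw [Function.comp_apply,
      show max ((t : Int) - ((colN : Int) - 1)) 0 = 0 from by omega,
      show max (-((t : Int) - ((colN : Int) - 1))) 0 = (colN : Int) - 1 - (t : Int) from by omega]
  · rw [List.map_map]
    apply List.map_congr_left
    intro t _
    rw [Function.comp_apply, Function.comp_apply,
      show ((((colN + t : Nat)) : Int) - ((colN : Int) - 1)) = (t : Int) + 1 from by push_cast; ring]
    rw [show max ((t : Int) + 1) 0 = (t : Int) + 1 from by omega,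
      show max (-((t : Int) + 1)) 0 = 0 from by omega]


-- ===== VERDICT (by name: the statement is the Claim_ definition above) =====
theorem diagonal_right_board_spec : Claim_equal_diagonal_right_board := by
  intro board _ hpre
  unfold Spec_diagonal_right_board
  obtain ⟨hne, -⟩ := hpre
  by_cases hcol : (PySem.List.pyGetD board 0 []).length = 0
  · rw [pv_zero_col_A board hcol, pv_zero_col_B board hcol]
  · have hc : 1 ≤ (PySem.List.pyGetD board 0 []).length := by omega
    have hn : 1 ≤ board.length := List.length_pos_iff.mpr hne
    rw [pv_A_eq board _ _ hc hn rfl rfl, pv_B_eq board _ _ hc hn rfl rfl, pv_asc_split board _ _ hc hn]
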